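-- pv_equiv track=rewrite | github.com/allenwind/tf2bert | tf2bert/text/bmes.py | bmes2words
-- ===== SOURCE A (Python) =====
-- def bmes2words(chars, tags):
--     result = []
--     if len(chars) == 0:
--         return result
--     word = chars[0]
--
--     for c, t in zip(chars[1:], tags[1:]):
--         if t == 'B' or t == 'S':
--             result.append(word)
--             word = ''
--         word += c
--     if len(word) != 0:
--         result.append(word)
--
--     return result
-- ===== SOURCE B (Python) =====
-- def bmes2words(chars, tags):
--     # The first character always begins a word, whatever its tag says.
--     tags = ['B'] + list(tags[1:])
--     n = min(len(chars), len(tags))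
--     starts = [i for i in range(n) if tags[i] == 'B' or tags[i] == 'S']
--     return [''.join(chars[a:b]) for a, b in zip(starts, starts[1:] + [n])]
-- ===== Notes on version B (the rewrite author's own statement) =====
-- stated objective: alternative
-- what changed: A streams a char-by-char word accumulator (flush on B/S, final append if nonempty); B normalizes the first tag to 'B', computes the list of word-start indices, and emits each word by joining a slice between consecutive starts. Pre_ excludes exactly the inputs whose final word is assembled only from empty strings (chars elements stand for single characters): there A silently drops that word while B keeps '', neither behaviour being specified.
-- outside the precondition, e.g. on bmes2words([''], ['S']): A returns [], B returns ['']; on bmes2words(['a', ''], ['B', 'S']): A returns ['a'], B returns ['a', '']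
import Mathlib
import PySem

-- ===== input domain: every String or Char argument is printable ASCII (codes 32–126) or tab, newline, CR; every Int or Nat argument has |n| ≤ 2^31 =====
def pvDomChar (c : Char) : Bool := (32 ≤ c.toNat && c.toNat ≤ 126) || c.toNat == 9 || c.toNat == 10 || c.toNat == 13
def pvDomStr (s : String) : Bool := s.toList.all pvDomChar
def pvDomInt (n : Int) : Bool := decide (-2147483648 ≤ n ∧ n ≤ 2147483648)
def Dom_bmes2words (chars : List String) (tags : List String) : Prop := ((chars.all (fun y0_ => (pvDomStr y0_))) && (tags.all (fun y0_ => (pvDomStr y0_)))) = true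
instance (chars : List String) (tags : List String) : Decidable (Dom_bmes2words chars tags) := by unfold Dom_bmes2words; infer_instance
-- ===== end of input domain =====

-- ===== PORT A =====
-- B replaces A's streaming word accumulator by word-start indices + slice joins (objective: alternative, same cost).
def bmes2words (chars : List String) (tags : List String) : List String :=
  match chars with
  | [] => []
  | c0 :: rest =>
    -- for c, t in zip(chars[1:], tags[1:]): …
    let r := (rest.zip (tags.drop 1)).foldl
      (fun (st : List String × String) (p : String × String) =>
        if p.2 = "B" ∨ p.2 = "S" then (st.1 ++ [st.2], "" ++ p.1) else (st.1, st.2 ++ p.1))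
      ([], c0)
    if r.2 ≠ "" then r.1 ++ [r.2] else r.1

-- ===== PORT B =====
def bmes2words_alt (chars : List String) (tags : List String) : List String :=
  -- tags = ['B'] + list(tags[1:])
  let tags2 := "B" :: tags.drop 1
  let n := min chars.length tags2.length
  -- Python's tags[i] for 0 ≤ i < n is always in range; getD is only a totalizing guard.
  let starts := (List.range n).filter (fun i => tags2.getD i "" = "B" ∨ tags2.getD i "" = "S")
  (starts.zip (starts.drop 1 ++ [n])).map
    (fun p => String.join ((chars.drop p.1).take (p.2 - p.1)))

-- ===== PRECONDITION & SPEC =====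
-- Pre_ excludes exactly the inputs whose final segmented word (from the last 'B'/'S' start in the
-- zipped range to its end) is assembled only from empty strings: chars elements stand for single
-- characters, and on such a word A silently drops it while B keeps '', neither behaviour being specified.
def Pre_bmes2words (chars : List String) (tags : List String) : Prop :=
  chars = [] ∨
  ∃ j < min chars.length (max 1 tags.length), chars.getD j "" ≠ "" ∧
    ∀ k < min chars.length (max 1 tags.length), j < k →
      ¬(tags.getD k "" = "B" ∨ tags.getD k "" = "S")
instance (chars : List String) (tags : List String) : Decidable (Pre_bmes2words chars tags) := by unfold Pre_bmes2words; infer_instance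
def pvWitness_bmes2words : List String × List String := (["a", "b", "c"], ["B", "M", "E"])

def Spec_bmes2words (chars : List String) (tags : List String) (out : List String) : Prop := out = bmes2words_alt chars tags
instance (chars : List String) (tags : List String) (out : List String) : Decidable (Spec_bmes2words chars tags out) := by unfold Spec_bmes2words; infer_instance

-- ===== CLAIM (what is proved, stated in full; the proofs are below) =====
def Claim_equal_bmes2words : Prop := ∀ (chars : List String) (tags : List String), Dom_bmes2words chars tags → Pre_bmes2words chars tags → Spec_bmes2words chars tags (bmes2words chars tags)

-- ===== LEMMAS AND PROOFS =====

-- pvCore: the common word-splitting skeleton both ports are reduced to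
def pvCore : String → List (String × Bool) → List String
  | w, [] => [w]
  | w, (c, b) :: ps => if b then w :: pvCore c ps else pvCore (w ++ c) ps

def pvIdxs : List Bool → Nat → List Nat
  | [], _ => []
  | b :: fs, s => if b then s :: pvIdxs fs (s + 1) else pvIdxs fs (s + 1)

def pvSliceJoin (xs : List String) (p : Nat × Nat) : String :=
  String.join ((xs.drop p.1).take (p.2 - p.1))

def pvWords (xs : List String) (flags : List Bool) : List String :=
  let bs := 0 :: (pvIdxs flags 1 ++ [flags.length + 1])
  (bs.zip bs.tail).map (pvSliceJoin xs)

theorem pv_foldl_append_str (a b : String) (l : List String) :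
    List.foldl (fun r s => r ++ s) (a ++ b) l = a ++ List.foldl (fun r s => r ++ s) b l := by
  induction l generalizing b with
  | nil => rfl
  | cons x xs ih => simp [List.foldl, String.append_assoc, ih]

theorem pv_join_cons (s : String) (l : List String) :
    String.join (s :: l) = s ++ String.join l := by
  have := pv_foldl_append_str s "" l
  simpa [String.join] using this

theorem pvIdxs_shift (fs : List Bool) (s : Nat) :
    pvIdxs fs (s + 1) = (pvIdxs fs s).map (· + 1) := by
  induction fs generalizing s with
  | nil => simp [pvIdxs]
  | cons b fs ih =>
    by_cases hb : b <;> simp [pvIdxs, hb, ih]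

theorem pvIdxs_mem_lt (fs : List Bool) : ∀ (s x : Nat), x ∈ pvIdxs fs s → s ≤ x ∧ x < s + fs.length := by
  induction fs with
  | nil => intro s x hx; simp [pvIdxs] at hx
  | cons b fs ih =>
    intro s x hx
    by_cases hb : b
    · simp only [pvIdxs, hb, if_true, List.mem_cons] at hx
      rcases hx with rfl | hx
      · simp
      · obtain ⟨h1, h2⟩ := ih (s + 1) x hx
        simp only [List.length_cons]; omega
    · simp only [pvIdxs, hb, if_false, Bool.false_eq_true] at hx
      obtain ⟨h1, h2⟩ := ih (s + 1) x hx
      simp only [List.length_cons]; omega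

theorem pv_zip_map_shift (l1 l2 : List Nat) :
    (l1.map (· + 1)).zip (l2.map (· + 1)) = (l1.zip l2).map (fun p => (p.1 + 1, p.2 + 1)) := by
  rw [List.zip_map]; rfl

theorem pvSliceJoin_shift (x : String) (xs : List String) (a b : Nat) :
    pvSliceJoin (x :: xs) (a + 1, b + 1) = pvSliceJoin xs (a, b) := by
  simp [pvSliceJoin]

theorem pvSliceJoin_drop_head (x y : String) (xs : List String) (a b : Nat) (ha : 1 ≤ a) :
    pvSliceJoin (x :: xs) (a, b) = pvSliceJoin (y :: xs) (a, b) := by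
  obtain ⟨a', rfl⟩ : ∃ a', a = a' + 1 := ⟨a - 1, by omega⟩
  simp [pvSliceJoin]

theorem pvMerge (w c : String) (cs : List String) (L : List Nat) (hL : ∀ x ∈ L, 1 ≤ x) :
    ((0 :: L.map (· + 1)).zip (L.map (· + 1))).map (pvSliceJoin (w :: c :: cs))
      = ((0 :: L).zip L).map (pvSliceJoin ((w ++ c) :: cs)) := by
  cases L with
  | nil => simp
  | cons b L' =>
    simp only [List.map_cons, List.zip_cons_cons, List.map_cons]
    congr 1
    · have hb : 1 ≤ b := hL b (by simp)
      obtain ⟨b', rfl⟩ : ∃ b', b = b' + 1 := ⟨b - 1, by omega⟩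
      simp [pvSliceJoin, pv_join_cons, String.append_assoc]
    · rw [show (((b + 1) :: L'.map (· + 1)).zip (L'.map (· + 1)))
          = ((b :: L').map (· + 1)).zip (L'.map (· + 1)) from rfl,
        pv_zip_map_shift, List.map_map]
      apply List.map_congr_left
      intro p hp
      have hp1 : 1 ≤ p.1 := hL p.1 (List.of_mem_zip hp).1
      calc (pvSliceJoin (w :: c :: cs) ∘ fun p => (p.1 + 1, p.2 + 1)) p
          = pvSliceJoin (c :: cs) (p.1, p.2) := by
            simpa using pvSliceJoin_shift w (c :: cs) p.1 p.2
        _ = pvSliceJoin ((w ++ c) :: cs) (p.1, p.2) := pvSliceJoin_drop_head _ _ _ _ _ hp1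
        _ = pvSliceJoin ((w ++ c) :: cs) p := by simp

theorem pvWords_eq_core (flags : List Bool) : ∀ (w : String) (cs : List String),
    cs.length = flags.length → pvWords (w :: cs) flags = pvCore w (cs.zip flags) := by
  induction flags with
  | nil =>
    intro w cs hlen
    have : cs = [] := List.length_eq_zero_iff.mp (by simpa using hlen)
    subst this
    simp [pvWords, pvIdxs, pvCore, pvSliceJoin, String.join]
  | cons b fs ih =>
    intro w cs hlen
    cases cs with
    | nil => simp at hlen
    | cons c cs' =>
      have hlen' : cs'.length = fs.length := by simpa using hlen
      have hsh : pvIdxs fs 2 = (pvIdxs fs 1).map (· + 1) := pvIdxs_shift fs 1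
      by_cases hb : b
      · subst hb
        show ((0 :: (pvIdxs (true :: fs) 1 ++ [(true :: fs).length + 1])).zip
            ((0 :: (pvIdxs (true :: fs) 1 ++ [(true :: fs).length + 1])).tail)).map
              (pvSliceJoin (w :: c :: cs'))
            = pvCore w ((c :: cs').zip (true :: fs))
        have hbs : pvIdxs (true :: fs) 1 ++ [(true :: fs).length + 1]
            = 1 :: ((pvIdxs fs 1).map (· + 1) ++ [fs.length + 1 + 1]) := by
          simp [pvIdxs, hsh]
        have hbs2 : (1 : Nat) :: ((pvIdxs fs 1).map (· + 1) ++ [fs.length + 1 + 1])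
            = (0 :: (pvIdxs fs 1 ++ [fs.length + 1])).map (· + 1) := by
          simp
        rw [hbs,
          show pvCore w ((c :: cs').zip (true :: fs)) = w :: pvCore c (cs'.zip fs) from by
            simp [pvCore]]
        simp only [List.zip_cons_cons, List.tail_cons, List.map_cons]
        congr 1
        have hbs3 : (pvIdxs fs 1).map (· + 1) ++ [fs.length + 1 + 1]
            = (pvIdxs fs 1 ++ [fs.length + 1]).map (· + 1) := by simp
        rw [hbs2, hbs3, pv_zip_map_shift, List.map_map]
        have hpt : ∀ p ∈ ((0 :: (pvIdxs fs 1 ++ [fs.length + 1])).zip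
            (pvIdxs fs 1 ++ [fs.length + 1])),
            (pvSliceJoin (w :: c :: cs') ∘ fun p => (p.1 + 1, p.2 + 1)) p
              = pvSliceJoin (c :: cs') p := by
          intro p _
          have := pvSliceJoin_shift w (c :: cs') p.1 p.2
          simpa using this
        rw [List.map_congr_left hpt]
        have := ih c cs' hlen'
        simpa [pvWords, pvCore] using this
      · have hbf : b = false := by simpa using hb
        subst hbf
        show ((0 :: (pvIdxs (false :: fs) 1 ++ [(false :: fs).length + 1])).zip
            ((0 :: (pvIdxs (false :: fs) 1 ++ [(false :: fs).length + 1])).tail)).map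
              (pvSliceJoin (w :: c :: cs'))
            = pvCore w ((c :: cs').zip (false :: fs))
        have hbs : pvIdxs (false :: fs) 1 ++ [(false :: fs).length + 1]
            = (pvIdxs fs 1 ++ [fs.length + 1]).map (· + 1) := by
          simp [pvIdxs, hsh]
        rw [hbs]
        have hge : ∀ x ∈ pvIdxs fs 1 ++ [fs.length + 1], 1 ≤ x := by
          intro x hx
          rcases List.mem_append.mp hx with h | h
          · exact (pvIdxs_mem_lt fs 1 x h).1
          · simp at h; omega
        rw [show ((0 :: (pvIdxs fs 1 ++ [fs.length + 1]).map (· + 1)).tail)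
            = (pvIdxs fs 1 ++ [fs.length + 1]).map (· + 1) from rfl]
        rw [pvMerge w c cs' _ hge]
        have := ih (w ++ c) cs' hlen'
        rw [show pvCore w ((c :: cs').zip (false :: fs))
            = pvCore (w ++ c) (cs'.zip fs) from by simp [pvCore]]
        rw [← this]
        rfl

theorem pv_getLast!_cons (w : String) (l : List String) (h : l ≠ []) :
    (w :: l).getLast! = l.getLast! := by
  cases l with
  | nil => exact absurd rfl h
  | cons x xs => simp [List.getLast!]

def pvTrim (l : List String) : List String :=
  if l ≠ [] ∧ l.getLast! = "" then l.dropLast else l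

theorem pvTrim_cons (w : String) (l : List String) (h : l ≠ []) :
    pvTrim (w :: l) = w :: pvTrim l := by
  unfold pvTrim
  rcases eq_or_ne l.getLast! "" with he | he
  · rw [if_pos ⟨by simp, by rw [pv_getLast!_cons w l h]; exact he⟩, if_pos ⟨h, he⟩,
      List.dropLast_cons_of_ne_nil h]
  · rw [if_neg (fun hc => he (by rw [← pv_getLast!_cons w l h]; exact hc.2)),
      if_neg (fun hc => he hc.2)]

theorem pvCore_ne_nil (w : String) (ps : List (String × Bool)) : pvCore w ps ≠ [] := by
  induction ps generalizing w with
  | nil => simp [pvCore]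
  | cons p ps ih =>
    obtain ⟨c, b⟩ := p
    by_cases hb : b <;> simp [pvCore, hb, ih]

theorem pv_append_ne (w c : String) (hw : w ≠ "") : w ++ c ≠ "" := by
  intro h
  have h2 : w = "" ∧ c = "" := by simpa using congrArg String.toList h
  exact hw h2.1

theorem pv_append_ne2 (w c : String) (hc : c ≠ "") : w ++ c ≠ "" := by
  intro h
  have h2 : w = "" ∧ c = "" := by simpa using congrArg String.toList h
  exact hc h2.2

-- if no word start occurs at all, the (nonempty) pending word survives to the end
theorem pvL0 (ps : List (String × Bool)) : ∀ (w : String), w ≠ "" →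
    (∀ k, k < ps.length → (ps.getD k ("", false)).2 = false) →
    (pvCore w ps).getLast! ≠ "" := by
  induction ps with
  | nil => intro w hw _; simpa [pvCore, List.getLast!] using hw
  | cons p ps ih =>
    intro w hw hf
    obtain ⟨c, b⟩ := p
    have hb : b = false := by simpa using hf 0 (by simp)
    subst hb
    rw [show pvCore w ((c, false) :: ps) = pvCore (w ++ c) ps from by simp [pvCore]]
    exact ih (w ++ c) (pv_append_ne w c hw)
      (fun k hk => by simpa using hf (k + 1) (by simp only [List.length_cons]; omega))

-- if some char at or after the last word start is nonempty, the last word is nonempty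
theorem pvL1 (ps : List (String × Bool)) : ∀ (i : Nat) (w : String), i < ps.length →
    (ps.getD i ("", false)).1 ≠ "" →
    (∀ k, k < ps.length → i < k → (ps.getD k ("", false)).2 = false) →
    (pvCore w ps).getLast! ≠ "" := by
  induction ps with
  | nil => intro i w hi _ _; simp at hi
  | cons p ps ih =>
    intro i w hi hc hf
    obtain ⟨c, b⟩ := p
    match i with
    | 0 =>
      have hc0 : c ≠ "" := by simpa using hc
      have hf' : ∀ k, k < ps.length → (ps.getD k ("", false)).2 = false :=
        fun k hk => by
          simpa using hf (k + 1) (by simp only [List.length_cons]; omega) (by omega)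
      by_cases hb : b
      · subst hb
        rw [show pvCore w ((c, true) :: ps) = w :: pvCore c ps from by simp [pvCore],
          pv_getLast!_cons _ _ (pvCore_ne_nil c ps)]
        exact pvL0 ps c hc0 hf'
      · have hb' : b = false := by simpa using hb
        subst hb'
        rw [show pvCore w ((c, false) :: ps) = pvCore (w ++ c) ps from by simp [pvCore]]
        exact pvL0 ps (w ++ c) (pv_append_ne2 w c hc0) hf'
    | j + 1 =>
      have hj : j < ps.length := by simp only [List.length_cons] at hi; omega
      have hc' : (ps.getD j ("", false)).1 ≠ "" := by simpa using hc
      have hf' : ∀ k, k < ps.length → j < k → (ps.getD k ("", false)).2 = false :=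
        fun k hk hjk => by
          simpa using hf (k + 1) (by simp only [List.length_cons]; omega) (by omega)
      by_cases hb : b
      · subst hb
        rw [show pvCore w ((c, true) :: ps) = w :: pvCore c ps from by simp [pvCore],
          pv_getLast!_cons _ _ (pvCore_ne_nil c ps)]
        exact ih j c hj hc' hf'
      · have hb' : b = false := by simpa using hb
        subst hb'
        rw [show pvCore w ((c, false) :: ps) = pvCore (w ++ c) ps from by simp [pvCore]]
        exact ih j (w ++ c) hj hc' hf'

-- the k-th entry of A's zipped char/flag list, in terms of the original inputs
theorem pvZ_getD (rest tags : List String) (k : Nat)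
    (hk : k < min rest.length (tags.drop 1).length) :
    (((rest.zip (tags.drop 1)).map
        (fun p => (p.1, decide (p.2 = "B" ∨ p.2 = "S")))).getD k ("", false))
      = (rest.getD k "", decide (tags.getD (k + 1) "" = "B" ∨ tags.getD (k + 1) "" = "S")) := by
  have hk1 : k < rest.length := by omega
  have hk2 : k < (tags.drop 1).length := by omega
  have hk3 : k + 1 < tags.length := by
    simp only [List.length_drop] at hk2; omega
  rw [List.getD_eq_getElem _ _ (by simp [List.length_zip]; omega)]
  simp only [List.getElem_map, List.getElem_zip]
  rw [List.getD_eq_getElem rest "" hk1, List.getD_eq_getElem tags "" hk3]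
  simp

theorem pvTrim_eq_self (l : List String) (h : l.getLast! ≠ "") : pvTrim l = l := by
  unfold pvTrim
  rw [if_neg]
  rintro ⟨-, h2⟩
  exact h h2

-- A's fold-with-final-append, accumulator generalized, reduced to pvTrim ∘ pvCore
theorem pvA_fold (ps : List (String × String)) (res : List String) (word : String) :
    (let r := ps.foldl
        (fun (st : List String × String) (p : String × String) =>
          if p.2 = "B" ∨ p.2 = "S" then (st.1 ++ [st.2], "" ++ p.1) else (st.1, st.2 ++ p.1))
        (res, word)
     if r.2 ≠ "" then r.1 ++ [r.2] else r.1)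
    = res ++ pvTrim (pvCore word (ps.map (fun p => (p.1, decide (p.2 = "B" ∨ p.2 = "S"))))) := by
  induction ps generalizing res word with
  | nil =>
    by_cases hw : word = "" <;> simp [pvCore, pvTrim, hw]
  | cons p ps ih =>
    obtain ⟨c, t⟩ := p
    simp only [List.foldl_cons]
    by_cases ht : t = "B" ∨ t = "S"
    · rw [show (if (c, t).2 = "B" ∨ (c, t).2 = "S" then (res ++ [word], "" ++ c)
            else (res, word ++ c)) = (res ++ [word], "" ++ c) from if_pos ht]
      have h1 := ih (res ++ [word]) ("" ++ c)
      simp only [String.empty_append] at h1 ⊢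
      rw [h1]
      rw [show pvCore word (((c, t) :: ps).map (fun p => (p.1, decide (p.2 = "B" ∨ p.2 = "S"))))
          = word :: pvCore c (ps.map (fun p => (p.1, decide (p.2 = "B" ∨ p.2 = "S")))) from by
        simp only [List.map_cons, pvCore]
        rw [if_pos (by simp [ht])]]
      rw [pvTrim_cons _ _ (pvCore_ne_nil _ _)]
      simp
    · rw [show (if (c, t).2 = "B" ∨ (c, t).2 = "S" then (res ++ [word], "" ++ c)
            else (res, word ++ c)) = (res, word ++ c) from if_neg ht]
      have h1 := ih res (word ++ c)
      simp only at h1 ⊢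
      rw [h1]
      rw [show pvCore word (((c, t) :: ps).map (fun p => (p.1, decide (p.2 = "B" ∨ p.2 = "S"))))
          = pvCore (word ++ c) (ps.map (fun p => (p.1, decide (p.2 = "B" ∨ p.2 = "S")))) from by
        simp only [List.map_cons, pvCore]
        rw [if_neg (by simp [ht])]]

theorem pv_filter_range' (m : Nat) : ∀ (s : Nat) (p : Nat → Bool),
    (List.range' s m).filter p = pvIdxs ((List.range' s m).map p) s := by
  induction m with
  | zero => intro s p; simp [pvIdxs]
  | succ m ih =>
    intro s p
    rw [List.range'_succ]
    by_cases hp : p s <;> simp [pvIdxs, hp, ih (s + 1) p]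

theorem pv_zip_eq_zip_take (l1 : List String) : ∀ (l2 : List String),
    l1.zip l2 = (l1.take (min l1.length l2.length)).zip (l2.take (min l1.length l2.length)) := by
  induction l1 with
  | nil => intro l2; simp
  | cons x xs ih =>
    intro l2
    cases l2 with
    | nil => simp
    | cons y ys =>
      simp only [List.zip_cons_cons, List.length_cons]
      rw [Nat.succ_min_succ]
      simp [ih ys]

theorem pv_zip_map_snd (l1 : List String) : ∀ (l2 : List String) (f : String → Bool),
    (l1.zip l2).map (fun p => (p.1, f p.2)) = l1.zip (l2.map f) := by
  induction l1 with
  | nil => intro l2 f; simp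
  | cons x xs ih =>
    intro l2 f
    cases l2 with
    | nil => simp
    | cons y ys => simp [ih ys]

-- zip of (a :: L) with (L ++ [x]) equals the consecutive-pairs zip of (a :: L ++ [x])
theorem pv_zip_shape {α : Type} (L : List α) : ∀ (a x : α),
    (a :: L).zip (L ++ [x]) = (a :: (L ++ [x])).zip (L ++ [x]) := by
  induction L with
  | nil => intro a x; rfl
  | cons b L ih =>
    intro a x
    simp only [List.cons_append, List.zip_cons_cons]
    rw [ih b x]

-- the normalized tag list agrees with tags at every positive index
theorem pv_tags2_getD (tags : List String) (j : Nat) :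
    ("B" :: tags.drop 1).getD (j + 1) "" = tags.getD (j + 1) "" := by
  simp [List.getD_eq_getElem?_getD]

-- ===== VERDICT (by name: the statement is the Claim_ definition above) =====
theorem bmes2words_spec : Claim_equal_bmes2words := by
  intro chars tags _ hpre
  unfold Spec_bmes2words
  match chars with
  | [] => simp [bmes2words, bmes2words_alt]
  | c0 :: rest =>
    have hA : bmes2words (c0 :: rest) tags
        = pvTrim (pvCore c0 ((rest.zip (tags.drop 1)).map
            (fun p => (p.1, decide (p.2 = "B" ∨ p.2 = "S"))))) := by
      unfold bmes2words
      have h1 := pvA_fold (rest.zip (tags.drop 1)) [] c0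
      simpa using h1
    have hzip : rest.zip (tags.drop 1)
        = (rest.take (min rest.length (tags.drop 1).length)).zip
            ((tags.drop 1).take (min rest.length (tags.drop 1).length)) :=
      pv_zip_eq_zip_take rest (tags.drop 1)
    have hn : min (c0 :: rest).length ("B" :: tags.drop 1).length
        = min rest.length (tags.drop 1).length + 1 := by
      simp [Nat.succ_min_succ]
    have hflags : (List.range' 1 (min rest.length (tags.drop 1).length)).map
          (fun i => decide (tags.getD i "" = "B" ∨ tags.getD i "" = "S"))
        = ((tags.drop 1).take (min rest.length (tags.drop 1).length)).map
          (fun t => decide (t = "B" ∨ t = "S")) := by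
      apply List.ext_getElem
      · simp
      · intro j h1 h2
        simp only [List.length_map, List.length_range'] at h1
        have hj : 1 + j < tags.length := by
          have hdl : (tags.drop 1).length = tags.length - 1 := by simp
          omega
        simp only [List.getElem_map, List.getElem_range', List.getElem_take,
          List.getElem_drop, one_mul]
        rw [List.getD_eq_getElem tags "" hj]
    have hFlen : (((tags.drop 1).take (min rest.length (tags.drop 1).length)).map
          (fun t => decide (t = "B" ∨ t = "S"))).length
        = min rest.length (tags.drop 1).length := by
      simp
    have hB : bmes2words_alt (c0 :: rest) tags
        = pvWords (c0 :: rest.take (min rest.length (tags.drop 1).length))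
            (((tags.drop 1).take (min rest.length (tags.drop 1).length)).map
              (fun t => decide (t = "B" ∨ t = "S"))) := by
      unfold bmes2words_alt
      simp only [hn]
      -- split range (m+1) into 0 :: range' 1 m, and evaluate the filter at 0
      rw [List.range_eq_range', List.range'_succ, List.filter_cons]
      rw [show (decide (("B" :: tags.drop 1).getD 0 "" = "B" ∨ ("B" :: tags.drop 1).getD 0 "" = "S")) = true from by simp [List.getD]]
      -- rewrite the filter predicate at positive indices to use tags directly
      rw [List.filter_congr (l := List.range' (0 + 1) (min rest.length (tags.drop 1).length))
        (p := fun i => decide (("B" :: tags.drop 1).getD i "" = "B" ∨ ("B" :: tags.drop 1).getD i "" = "S"))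
        (q := fun i => decide (tags.getD i "" = "B" ∨ tags.getD i "" = "S"))
        (by
          intro i hi
          have h1 : 1 ≤ i := by
            have := (List.mem_range'_1.mp hi).1
            omega
          obtain ⟨j, rfl⟩ : ∃ j, i = j + 1 := ⟨i - 1, by omega⟩
          simp only [pv_tags2_getD])]
      rw [if_pos rfl]
      rw [show (0 + 1) = 1 from rfl,
        pv_filter_range' (min rest.length (tags.drop 1).length) 1 _, hflags]
      -- reshape the zip into the consecutive-pairs form used by pvWords
      rw [List.drop_succ_cons, List.drop_zero,
        pv_zip_shape (pvIdxs (((tags.drop 1).take (min rest.length (tags.drop 1).length)).map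
            (fun t => decide (t = "B" ∨ t = "S"))) 1) 0
          (min rest.length (tags.drop 1).length + 1)]
      have hbounds_eq : ∀ p ∈ ((0 :: ((pvIdxs (((tags.drop 1).take
            (min rest.length (tags.drop 1).length)).map
              (fun t => decide (t = "B" ∨ t = "S"))) 1)
            ++ [min rest.length (tags.drop 1).length + 1])).zip
          (((pvIdxs (((tags.drop 1).take (min rest.length (tags.drop 1).length)).map
              (fun t => decide (t = "B" ∨ t = "S"))) 1)
            ++ [min rest.length (tags.drop 1).length + 1]))),
          String.join (((c0 :: rest).drop p.1).take (p.2 - p.1))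
            = pvSliceJoin (c0 :: rest.take (min rest.length (tags.drop 1).length)) p := by
        intro p hp
        have hp2 : p.2 ∈ ((pvIdxs (((tags.drop 1).take
            (min rest.length (tags.drop 1).length)).map
              (fun t => decide (t = "B" ∨ t = "S"))) 1)
            ++ [min rest.length (tags.drop 1).length + 1]) :=
          (List.of_mem_zip hp).2
        have hle : p.2 ≤ min rest.length (tags.drop 1).length + 1 := by
          rcases List.mem_append.mp hp2 with h' | h'
          · have := pvIdxs_mem_lt _ 1 p.2 h'
            rw [hFlen] at this
            omega
          · rw [List.mem_singleton] at h'; omega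
        have htake : c0 :: rest.take (min rest.length (tags.drop 1).length)
            = (c0 :: rest).take (min rest.length (tags.drop 1).length + 1) := by
          simp
        unfold pvSliceJoin
        rw [htake, List.drop_take, List.take_take]
        congr 2
        omega
      rw [List.map_congr_left hbounds_eq]
      unfold pvWords
      rw [hFlen]
      rfl
    have hZlen : ((rest.zip (tags.drop 1)).map
        (fun p => (p.1, decide (p.2 = "B" ∨ p.2 = "S")))).length
        = min rest.length (tags.drop 1).length := by
      simp [List.length_zip]
    have hne : (pvCore c0 ((rest.zip (tags.drop 1)).map
        (fun p => (p.1, decide (p.2 = "B" ∨ p.2 = "S"))))).getLast! ≠ "" := by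
      rcases hpre with hnil | ⟨j, hj, hcj, hnob⟩
      · exact absurd hnil (by simp)
      · have hE : min (c0 :: rest).length (max 1 tags.length)
            = min rest.length (tags.drop 1).length + 1 := by
          simp only [List.length_cons, List.length_drop]
          omega
        rw [hE] at hj hnob
        match j, hj, hcj, hnob with
        | 0, hj, hcj, hnob =>
          have hc0 : c0 ≠ "" := by simpa using hcj
          apply pvL0 _ c0 hc0
          intro k hk
          rw [hZlen] at hk
          rw [pvZ_getD rest tags k hk]
          exact decide_eq_false (hnob (k + 1) (by omega) (by omega))
        | i + 1, hj, hcj, hnob =>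
          have hi : i < min rest.length (tags.drop 1).length := by omega
          apply pvL1 _ i c0 (by rw [hZlen]; exact hi)
          · rw [pvZ_getD rest tags i hi]
            simpa using hcj
          · intro k hk hik
            rw [hZlen] at hk
            rw [pvZ_getD rest tags k hk]
            exact decide_eq_false (hnob (k + 1) (by omega) (by omega))
    rw [hA, pvTrim_eq_self _ hne, hB, hzip,
      pv_zip_map_snd (rest.take (min rest.length (tags.drop 1).length))
        ((tags.drop 1).take (min rest.length (tags.drop 1).length))
        (fun t => decide (t = "B" ∨ t = "S")),
      pvWords_eq_core _ c0 (rest.take (min rest.length (tags.drop 1).length))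
        (by rw [hFlen, List.length_take]; omega)]
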